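-- pv_equiv track=rewrite | github.com/Weixiaoyu146/zch | Main/DataPreprocessing/ImageProcessing.py | Correction_information
-- ===== SOURCE A (Python) =====
-- def Correction_information(vertbra):
--     Correction_information = []  # 脊柱修正信息
--
--     def takeSecond(elem):
--         return elem[1]
--
--     def takeFirst(elem):
--         return elem[0]
--
--     vertbra_sort = vertbra.copy()
--     vertbra_sort.sort(key=takeSecond)
--     temp_list = []
--     # 信息处理1.排序显示
--     for point in vertbra_sort:
--         if len(temp_list):
--             if temp_list[0][1] == point[1]:
--                 temp_list.append(point)
--
--             else:
--                 temp_list.sort(key=takeFirst)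
--                 Correction_information.append(temp_list.copy())
--                 temp_list.clear()
--                 temp_list.append(point)
--         else:
--             temp_list.append(point)
--     temp_list.sort(key=takeFirst)
--     Correction_information.append(temp_list.copy())
--     return Correction_information
-- ===== SOURCE B (Python) =====
-- def Correction_information(vertbra):
--     if not vertbra:
--         return [[]]
--     ys = sorted({p[1] for p in vertbra})
--     return [sorted([p for p in vertbra if p[1] == y], key=lambda q: q[0]) for y in ys]
-- ===== Notes on version B (the rewrite author's own statement) =====
-- stated objective: idiomatic
-- what changed: Replaces A's sort-whole-list-then-consecutive-groupby accumulator loop with a direct grouping: collect the distinct y-coordinates, and for each y in sorted order emit the x-sorted list of points with that y; the empty input keeps A's [[]] via a leading guard.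
import Mathlib
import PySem

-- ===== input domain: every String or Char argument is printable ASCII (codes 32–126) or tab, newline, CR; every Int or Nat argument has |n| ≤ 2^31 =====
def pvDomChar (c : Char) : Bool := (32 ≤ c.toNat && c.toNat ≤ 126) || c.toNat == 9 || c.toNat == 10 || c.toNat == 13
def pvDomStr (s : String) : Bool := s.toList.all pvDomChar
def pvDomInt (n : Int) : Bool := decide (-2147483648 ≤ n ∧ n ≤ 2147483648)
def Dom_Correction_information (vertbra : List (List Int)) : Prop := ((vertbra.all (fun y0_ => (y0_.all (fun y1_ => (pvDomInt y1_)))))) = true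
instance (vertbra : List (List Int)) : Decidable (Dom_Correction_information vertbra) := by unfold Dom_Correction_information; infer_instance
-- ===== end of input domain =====

-- B groups by y directly (distinct y's, sorted; each group = x-sorted filter) instead of A's
-- sort-then-consecutive-groupby loop; a leading guard keeps A's value [[]] on the empty input.

-- ===== PORT A =====
-- p[1] and p[0] (Pre_ guarantees every point has length ≥ 2, where getD equals Python's indexing)
def pvKy (p : List Int) : Int := p.getD 1 0
def pvKx (p : List Int) : Int := p.getD 0 0

-- one iteration of A's 'for point in vertbra_sort' loop; state = (Correction_information, temp_list)
def pvStep (s : List (List (List Int)) × List (List Int)) (point : List Int) :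
    List (List (List Int)) × List (List Int) :=
  if s.2.length ≠ 0 then
    if pvKy (s.2.headD []) = pvKy point then (s.1, s.2 ++ [point])
    else (s.1 ++ [PySem.List.sorted s.2 pvKx], [point])
  else (s.1, s.2 ++ [point])

def Correction_information (vertbra : List (List Int)) : List (List (List Int)) :=
  let vertbra_sort := PySem.List.sorted vertbra pvKy
  let r := vertbra_sort.foldl pvStep ([], [])
  r.1 ++ [PySem.List.sorted r.2 pvKx]

-- ===== PORT B =====
def Correction_information_alt (vertbra : List (List Int)) : List (List (List Int)) :=
  if vertbra.isEmpty then [[]]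
  else
    let ys := PySem.List.sorted (PySem.Set.ofList (vertbra.map pvKy)) (fun y => y)
    ys.map (fun y => PySem.List.sorted (vertbra.filter (fun p => pvKy p == y)) pvKx)

-- ===== PRECONDITION & SPEC =====
-- Pre_ excludes points of length < 2, on which Python A raises IndexError in the sort key.
def Pre_Correction_information (vertbra : List (List Int)) : Prop :=
  ∀ p ∈ vertbra, 2 ≤ p.length
instance (vertbra : List (List Int)) : Decidable (Pre_Correction_information vertbra) := by
  unfold Pre_Correction_information; infer_instance
def pvWitness_Correction_information : List (List Int) := [[1, 2], [0, 2], [5, 1]]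

def Spec_Correction_information (vertbra : List (List Int)) (out : List (List (List Int))) : Prop :=
  out = Correction_information_alt vertbra
instance (vertbra : List (List Int)) (out : List (List (List Int))) : Decidable (Spec_Correction_information vertbra out) := by
  unfold Spec_Correction_information; infer_instance

-- ===== CLAIM (what is proved, stated in full; the proofs are below) =====
def Claim_equal_Correction_information : Prop := ∀ (vertbra : List (List Int)), Dom_Correction_information vertbra → Pre_Correction_information vertbra → Spec_Correction_information vertbra (Correction_information vertbra)

-- ===== LEMMAS AND PROOFS =====

-- inserting x into a key-sorted list appends x to its own key class and leaves the others alone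
theorem pv_filter_insertBy (y : Int) (x : List Int) (l : List (List Int))
    (h : l.Pairwise (fun a b => pvKy a ≤ pvKy b)) :
    (PySem.List.insertBy (fun a b => decide (pvKy a < pvKy b)) x l).filter (fun p => pvKy p == y)
      = l.filter (fun p => pvKy p == y) ++ (if pvKy x = y then [x] else []) := by
  induction l with
  | nil =>
    simp only [PySem.List.insertBy, List.filter]
    split_ifs with h1
    · simp [h1]
    · rw [show (pvKy x == y) = false from by simp [h1]]
      rfl
  | cons a t ih =>
    rw [List.pairwise_cons] at h
    obtain ⟨ha, ht⟩ := h
    by_cases hlt : pvKy x < pvKy a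
    · have hins : PySem.List.insertBy (fun a b => decide (pvKy a < pvKy b)) x (a :: t)
          = x :: a :: t := by simp [PySem.List.insertBy, hlt]
      rw [hins]
      by_cases hxy : pvKy x = y
      · have hfilt : (a :: t).filter (fun p => pvKy p == y) = [] := by
          rw [List.filter_eq_nil_iff]
          intro p hp
          rcases List.mem_cons.mp hp with hp | hp
          · subst hp; simp only [beq_iff_eq]; omega
          · have := ha p hp; simp only [beq_iff_eq]; omega
        rw [List.filter_cons]
        have hx : (pvKy x == y) = true := by simp [hxy]
        simp only [hfilt, hxy, if_pos]
        simp
      · simp only [List.filter_cons, beq_iff_eq, hxy]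
        simp
    · have hins : PySem.List.insertBy (fun a b => decide (pvKy a < pvKy b)) x (a :: t)
          = a :: PySem.List.insertBy (fun a b => decide (pvKy a < pvKy b)) x t := by
        simp [PySem.List.insertBy, hlt]
      rw [hins, List.filter_cons, List.filter_cons, ih ht]
      by_cases hay : pvKy a = y <;> simp [hay]

-- stability: sorting by y permutes nothing inside a y-class
theorem pv_sorted_filter (y : Int) (vertbra : List (List Int)) :
    (PySem.List.sorted vertbra pvKy).filter (fun p => pvKy p == y)
      = vertbra.filter (fun p => pvKy p == y) := by
  induction vertbra using List.reverseRecOn with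
  | nil => simp [PySem.List.sorted_eq_foldl_insertBy]
  | append_singleton l x ih =>
    have hs : PySem.List.sorted (l ++ [x]) pvKy
        = PySem.List.insertBy (fun a b => decide (pvKy a < pvKy b)) x (PySem.List.sorted l pvKy) := by
      rw [PySem.List.sorted_eq_foldl_insertBy, PySem.List.sorted_eq_foldl_insertBy, List.foldl_append]
      rfl
    rw [hs, pv_filter_insertBy y x _ (PySem.List.sorted_pairwise l pvKy), ih, List.filter_append]
    by_cases hxy : pvKy x = y <;> simp [hxy]

-- in a key-sorted list whose minimum key is y, the y-class is an initial segment
theorem pv_split_min (y : Int) (S : List (List Int))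
    (h : S.Pairwise (fun a b => pvKy a ≤ pvKy b)) (hmin : ∀ p ∈ S, y ≤ pvKy p) :
    S = S.filter (fun p => pvKy p == y) ++ S.filter (fun p => !(pvKy p == y)) := by
  induction S with
  | nil => simp
  | cons a t ih =>
    rw [List.pairwise_cons] at h
    obtain ⟨ha, ht⟩ := h
    by_cases hay : pvKy a = y
    · have := ih ht (fun p hp => hmin p (List.mem_cons_of_mem a hp))
      simp only [List.filter_cons, beq_iff_eq, hay]
      simpa using this
    · have hya : y < pvKy a := lt_of_le_of_ne (hmin a (List.mem_cons_self)) (Ne.symm hay)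
      have hnone : t.filter (fun p => pvKy p == y) = [] := by
        rw [List.filter_eq_nil_iff]
        intro p hp
        have := ha p hp
        simp only [beq_iff_eq]; omega
      have hall : t.filter (fun p => !(pvKy p == y)) = t := by
        rw [List.filter_eq_self]
        intro p hp
        have := ha p hp
        simp only [Bool.not_eq_eq_eq_not, Bool.not_true, beq_eq_false_iff_ne, ne_eq]
        omega
      simp only [List.filter_cons, beq_iff_eq, hay]
      simp [hay, hnone, hall]

-- a key-sorted list is the concatenation of its key classes, taken in increasing key order
theorem pv_decomp : ∀ (ys : List Int) (S : List (List Int)),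
    S.Pairwise (fun a b => pvKy a ≤ pvKy b) → ys.Pairwise (· < ·) →
    (∀ z, z ∈ ys ↔ ∃ p ∈ S, pvKy p = z) →
    S = (ys.map (fun y => S.filter (fun p => pvKy p == y))).flatten := by
  intro ys
  induction ys with
  | nil =>
    intro S _ _ hmem
    cases S with
    | nil => simp
    | cons p t =>
      exfalso
      exact (List.not_mem_nil ((hmem (pvKy p)).mpr ⟨p, List.mem_cons_self, rfl⟩))
  | cons y yt ih =>
    intro S hS hys hmem
    rw [List.pairwise_cons] at hys
    obtain ⟨hy, hyt⟩ := hys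
    have hmin : ∀ p ∈ S, y ≤ pvKy p := by
      intro p hp
      have hz : pvKy p ∈ y :: yt := (hmem (pvKy p)).mpr ⟨p, hp, rfl⟩
      rcases List.mem_cons.mp hz with hz | hz
      · omega
      · have := hy _ hz; omega
    set S' := S.filter (fun p => !(pvKy p == y)) with hS'def
    have hsplit := pv_split_min y S hS hmin
    have hS' : S'.Pairwise (fun a b => pvKy a ≤ pvKy b) := hS.sublist (List.filter_sublist (l := S))
    have hmem' : ∀ z, z ∈ yt ↔ ∃ p ∈ S', pvKy p = z := by
      intro z
      constructor
      · intro hz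
        have hzy : y < z := hy _ hz
        obtain ⟨p, hp, hpk⟩ := (hmem z).mp (List.mem_cons_of_mem _ hz)
        refine ⟨p, ?_, hpk⟩
        rw [hS'def, List.mem_filter]
        refine ⟨hp, ?_⟩
        simp only [Bool.not_eq_eq_eq_not, Bool.not_true, beq_eq_false_iff_ne, ne_eq]
        omega
      · intro ⟨p, hp, hpk⟩
        rw [hS'def, List.mem_filter] at hp
        obtain ⟨hpS, hpne⟩ := hp
        simp only [Bool.not_eq_eq_eq_not, Bool.not_true, beq_eq_false_iff_ne, ne_eq] at hpne
        have hz : z ∈ y :: yt := (hmem z).mpr ⟨p, hpS, hpk⟩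
        rcases List.mem_cons.mp hz with hz | hz
        · omega
        · exact hz
    have hrec := ih S' hS' hyt hmem'
    have hfilt_eq : ∀ z ∈ yt, S'.filter (fun p => pvKy p == z) = S.filter (fun p => pvKy p == z) := by
      intro z hz
      have hzy : y < z := hy _ hz
      rw [hS'def, List.filter_filter]
      apply List.filter_congr
      intro p hp
      by_cases hpz : pvKy p = z
      · simp [hpz]; omega
      · simp [hpz]
    rw [List.map_cons, List.flatten_cons]
    conv_lhs => rw [hsplit]
    congr 1
    rw [← hS'def, hrec]
    congr 1
    exact List.map_congr_left hfilt_eq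

-- A's loop swallows a same-key run into temp
theorem pv_run_same : ∀ (qs : List (List Int)) (acc : List (List (List Int))) (temp : List (List Int)),
    temp ≠ [] → (∀ q ∈ qs, pvKy q = pvKy (temp.headD [])) →
    qs.foldl pvStep (acc, temp) = (acc, temp ++ qs) := by
  intro qs
  induction qs with
  | nil => intro acc temp _ _; simp
  | cons q qt ih =>
    intro acc temp hne hk
    have h1 : pvStep (acc, temp) q = (acc, temp ++ [q]) := by
      have hlen : temp.length ≠ 0 := by simpa [List.length_eq_zero_iff] using hne
      have heq : pvKy (temp.headD []) = pvKy q := (hk q List.mem_cons_self).symm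
      unfold pvStep
      rw [if_pos hlen, if_pos heq]
    rw [List.foldl_cons, h1, ih acc (temp ++ [q]) (by simp) ?_]
    · simp
    · intro p hp
      rw [hk p (List.mem_cons_of_mem _ hp)]
      congr 1
      cases temp with
      | nil => exact absurd rfl hne
      | cons a t => simp

-- A's loop over a flatten of nonempty constant-key blocks with strictly increasing keys
theorem pv_blocks : ∀ (ys : List Int) (F : Int → List (List Int)) (acc : List (List (List Int)))
    (temp : List (List Int)), temp ≠ [] → ys.Pairwise (· < ·) →
    (∀ y ∈ ys, pvKy (temp.headD []) < y) →
    (∀ y ∈ ys, F y ≠ [] ∧ ∀ q ∈ F y, pvKy q = y) →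
    (let r := ((ys.map F).flatten).foldl pvStep (acc, temp)
     r.1 ++ [PySem.List.sorted r.2 pvKx])
      = acc ++ [PySem.List.sorted temp pvKx] ++ ys.map (fun y => PySem.List.sorted (F y) pvKx) := by
  intro ys
  induction ys with
  | nil => intro F acc temp _ _ _ _; simp
  | cons y yt ih =>
    intro F acc temp hne hys hlt hF
    rw [List.pairwise_cons] at hys
    obtain ⟨hy, hyt⟩ := hys
    obtain ⟨hFy_ne, hFy_k⟩ := hF y List.mem_cons_self
    obtain ⟨q, qs, hqqs⟩ : ∃ q qs, F y = q :: qs := by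
      cases hFq : F y with
      | nil => exact absurd hFq hFy_ne
      | cons a b => exact ⟨a, b, rfl⟩
    have hkq : pvKy q = y := hFy_k q (by rw [hqqs]; exact List.mem_cons_self)
    have hlen : temp.length ≠ 0 := by simpa [List.length_eq_zero_iff] using hne
    have hneq : ¬ (pvKy (temp.headD []) = pvKy q) := by
      have := hlt y List.mem_cons_self
      omega
    have h1 : pvStep (acc, temp) q = (acc ++ [PySem.List.sorted temp pvKx], [q]) := by
      unfold pvStep
      rw [if_pos hlen, if_neg hneq]
    have h2 : (F y).foldl pvStep (acc, temp)
        = (acc ++ [PySem.List.sorted temp pvKx], F y) := by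
      rw [hqqs, List.foldl_cons, h1, pv_run_same qs _ [q] (by simp) ?_]
      · simp
      · intro p hp
        simp only [List.headD_cons]
        rw [hFy_k p (by rw [hqqs]; exact List.mem_cons_of_mem _ hp), hkq]
    have hhead : pvKy ((F y).headD []) = y := by rw [hqqs]; simpa using hkq
    simp only [List.map_cons, List.flatten_cons]
    rw [List.foldl_append, h2]
    have := ih F (acc ++ [PySem.List.sorted temp pvKx]) (F y) hFy_ne hyt
      (by intro z hz; rw [hhead]; exact hy z hz)
      (fun z hz => hF z (List.mem_cons_of_mem _ hz))
    simp only at this ⊢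
    rw [this]
    simp

-- the assembly: on a nonempty input A and B agree
theorem pv_main : ∀ (v : List (List Int)), v ≠ [] →
    Correction_information v = Correction_information_alt v := by
  intro v hv
  unfold Correction_information Correction_information_alt
  rw [if_neg (by simp [hv])]
  dsimp only
  set S := PySem.List.sorted v pvKy with hSdef
  set ys := PySem.List.sorted (PySem.Set.ofList (v.map pvKy)) (fun y => y) with hysdef
  have hSpair : S.Pairwise (fun a b => pvKy a ≤ pvKy b) := PySem.List.sorted_pairwise v pvKy
  have hyspair : ys.Pairwise (· < ·) := PySem.List.sorted_ofList_pairwise_lt (v.map pvKy)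
  have hpermS : S.Perm v := PySem.List.sorted_perm v pvKy false
  have hmem : ∀ z, z ∈ ys ↔ ∃ p ∈ S, pvKy p = z := by
    intro z
    rw [hysdef, PySem.List.mem_sorted, PySem.Set.mem_ofList, List.mem_map]
    constructor
    · rintro ⟨p, hp, hpk⟩; exact ⟨p, hpermS.mem_iff.mpr hp, hpk⟩
    · rintro ⟨p, hp, hpk⟩; exact ⟨p, hpermS.mem_iff.mp hp, hpk⟩
  have hdec := pv_decomp ys S hSpair hyspair hmem
  have hFprop : ∀ y ∈ ys, (S.filter (fun p => pvKy p == y)) ≠ [] ∧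
      ∀ q ∈ S.filter (fun p => pvKy p == y), pvKy q = y := by
    intro y hy
    constructor
    · obtain ⟨p, hp, hpk⟩ := (hmem y).mp hy
      intro hnil
      have hmem2 : p ∈ S.filter (fun p => pvKy p == y) :=
        List.mem_filter.mpr ⟨hp, by simp [hpk]⟩
      rw [hnil] at hmem2
      exact List.not_mem_nil hmem2
    · intro q hq
      simpa using (List.mem_filter.mp hq).2
  obtain ⟨y0, yt, hys0⟩ : ∃ y0 yt, ys = y0 :: yt := by
    cases hc : ys with
    | nil =>
      exfalso
      obtain ⟨p, t, hpt⟩ : ∃ p t, v = p :: t := by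
        cases v with
        | nil => exact absurd rfl hv
        | cons a b => exact ⟨a, b, rfl⟩
      have : pvKy p ∈ ys := (hmem (pvKy p)).mpr ⟨p, hpermS.mem_iff.mpr (by rw [hpt]; exact List.mem_cons_self), rfl⟩
      rw [hc] at this
      exact List.not_mem_nil this
    | cons a b => exact ⟨a, b, rfl⟩
  -- split off the first block
  rw [hys0] at hdec hFprop hyspair ⊢
  rw [List.pairwise_cons] at hyspair
  obtain ⟨hy0lt, hytpair⟩ := hyspair
  obtain ⟨hF0ne, hF0k⟩ := hFprop y0 List.mem_cons_self
  obtain ⟨q, qs, hqqs⟩ : ∃ q qs, S.filter (fun p => pvKy p == y0) = q :: qs := by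
    cases hc : S.filter (fun p => pvKy p == y0) with
    | nil => exact absurd hc hF0ne
    | cons a b => exact ⟨a, b, rfl⟩
  simp only [List.map_cons, List.flatten_cons] at hdec
  conv_lhs => rw [hdec]
  rw [List.foldl_append, hqqs, List.foldl_cons]
  have hstep0 : pvStep (([] : List (List (List Int))), ([] : List (List Int))) q = ([], [q]) := by
    unfold pvStep
    simp
  rw [hstep0, pv_run_same qs [] [q] (by simp) ?_, List.singleton_append, ← hqqs]
  · have hblocks := pv_blocks yt (fun y => S.filter (fun p => pvKy p == y)) []
      (S.filter (fun p => pvKy p == y0)) hF0ne hytpair ?_ ?_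
    · simp only at hblocks ⊢
      rw [hblocks, pv_sorted_filter]
      simp only [List.nil_append, List.map_cons, List.singleton_append]
      congr 1
      apply List.map_congr_left
      intro z hz
      rw [pv_sorted_filter]
    · intro z hz
      have hhead : pvKy ((S.filter (fun p => pvKy p == y0)).headD []) = y0 := by
        rw [hqqs]
        simpa using hF0k q (by rw [hqqs]; exact List.mem_cons_self)
      rw [hhead]
      exact hy0lt z hz
    · exact fun z hz => hFprop z (List.mem_cons_of_mem _ hz)
  · intro p hp
    simp only [List.headD_cons]
    rw [hF0k p (by rw [hqqs]; exact List.mem_cons_of_mem _ hp),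
        hF0k q (by rw [hqqs]; exact List.mem_cons_self)]

-- ===== VERDICT (by name: the statement is the Claim_ definition above) =====
theorem Correction_information_spec : Claim_equal_Correction_information := by
  intro v _ _
  show Correction_information v = Correction_information_alt v
  cases v with
  | nil => decide
  | cons p t => exact pv_main (p :: t) (by simp)
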